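-- pv_equiv track=rewrite | github.com/SestrenExsis/CodeKatas | adventofcode2020/Solver.py | ticket_errors
-- ===== SOURCE A (Python) =====
-- from typing import Dict, List, Set, Tuple
--
-- def ticket_errors(
--     ticket: List[int],
--     rules: Dict[str, List[Tuple[int]]],
--     ):
--     errors = []
--     for value in ticket:
--         valid_ind = False
--         for valid_ranges in rules.values():
--             for valid_range in valid_ranges:
--                 min_val, max_val = valid_range
--                 if min_val <= value <= max_val:
--                     valid_ind = True
--                     break
--             if valid_ind:
--                 break
--         if not valid_ind:
--             errors.append(value)
--     result = errors
--     return result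
-- ===== SOURCE B (Python) =====
-- from bisect import bisect_right
--
-- def ticket_errors(ticket, rules):
--     # Flatten all valid ranges, sort by lower bound, merge into disjoint
--     # intervals once, then binary-search each ticket value.
--     intervals = sorted(
--         ((lo, hi) for ranges in rules.values() for lo, hi in ranges),
--         key=lambda p: p[0],
--     )
--     merged = []
--     for lo, hi in intervals:
--         if merged and lo <= merged[-1][1] + 1:
--             if hi > merged[-1][1]:
--                 merged[-1] = (merged[-1][0], hi)
--         else:
--             merged.append((lo, hi))
--     starts = [lo for lo, _ in merged]
--     result = []
--     for value in ticket:
--         i = bisect_right(starts, value) - 1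
--         if i < 0 or value > merged[i][1]:
--             result.append(value)
--     return result
-- ===== Notes on version B (the rewrite author's own statement) =====
-- stated objective: faster
-- what changed: B flattens all rule ranges, sorts and merges them once into disjoint intervals, then binary-searches each ticket value, instead of A's scan of every rule range for every value.
-- outside the precondition, e.g. on ticket_errors([], {'a': [(1,)]}): A returns [], B raises ValueError
import Mathlib
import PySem

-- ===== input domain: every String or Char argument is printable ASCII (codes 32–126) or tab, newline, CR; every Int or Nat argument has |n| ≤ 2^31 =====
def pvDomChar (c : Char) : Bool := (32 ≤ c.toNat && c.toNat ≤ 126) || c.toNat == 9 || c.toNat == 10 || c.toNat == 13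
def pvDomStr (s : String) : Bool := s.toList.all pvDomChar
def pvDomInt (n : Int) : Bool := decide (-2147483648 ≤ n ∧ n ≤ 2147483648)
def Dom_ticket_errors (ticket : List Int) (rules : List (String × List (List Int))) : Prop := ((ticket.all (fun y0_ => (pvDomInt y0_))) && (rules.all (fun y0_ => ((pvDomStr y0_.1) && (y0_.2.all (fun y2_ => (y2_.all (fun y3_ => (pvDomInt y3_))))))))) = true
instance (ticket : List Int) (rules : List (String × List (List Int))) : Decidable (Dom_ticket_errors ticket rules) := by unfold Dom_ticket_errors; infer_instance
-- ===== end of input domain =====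

-- B merges all valid ranges into disjoint sorted intervals once and binary-searches
-- each ticket value, instead of A's scan of every rule range per value (objective: faster).

-- ===== PORT A =====
-- inner loop 'for valid_range in valid_ranges' with the break on a match;
-- a range that is not a pair makes Python raise (excluded by Pre_), the port skips it
def pvCheckRanges (value : Int) : List (List Int) → Bool
  | [] => false
  | r :: rest =>
    match r with
    | [mn, mx] => if mn ≤ value ∧ value ≤ mx then true else pvCheckRanges value rest
    | _ => pvCheckRanges value rest

-- middle loop 'for valid_ranges in rules.values()' with the break once valid_ind is set
def pvCheckRules (value : Int) : List (String × List (List Int)) → Bool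
  | [] => false
  | (_, rs) :: rest => if pvCheckRanges value rs then true else pvCheckRules value rest

def ticket_errors (ticket : List Int) (rules : List (String × List (List Int))) : List Int :=
  ticket.foldl (fun errors value =>
    if pvCheckRules value rules then errors else errors ++ [value]) []

-- ===== PORT B =====
-- '(lo, hi) for ranges in rules.values() for lo, hi in ranges'
-- (a range that is not a pair makes Python raise — excluded by Pre_; the port skips it)
def pvIntervals (rules : List (String × List (List Int))) : List (Int × Int) :=
  rules.flatMap (fun r => r.2.filterMap (fun rg =>
    match rg with
    | [lo, hi] => some (lo, hi)
    | _ => none))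

-- Source B's merge loop; 'merged' is kept in REVERSE so that Python's merged[-1] is the head
def pvMergeRev : List (Int × Int) → List (Int × Int) → List (Int × Int)
  | acc, [] => acc
  | acc, (lo, hi) :: rest =>
    match acc with
    | (l, h) :: acc' =>
      if lo ≤ h + 1 then pvMergeRev ((l, if hi > h then hi else h) :: acc') rest
      else pvMergeRev ((lo, hi) :: (l, h) :: acc') rest
    | [] => pvMergeRev [(lo, hi)] rest

-- 'i = bisect_right(starts, value) - 1; i < 0 or value > merged[i][1]' as a validity test
def pvValid (starts : List Int) (merged : List (Int × Int)) (value : Int) : Bool :=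
  let i : Int := (PySem.List.bisectRight starts value : Int) - 1
  if i < 0 then false
  else
    match PySem.List.pyGet? merged i with
    | some (_, h) => decide (value ≤ h)
    | none => false          -- unreachable: 0 ≤ i < merged.length

def ticket_errors_alt (ticket : List Int) (rules : List (String × List (List Int))) : List Int :=
  let intervals := PySem.List.sorted (pvIntervals rules) (fun p => p.1)
  let merged := (pvMergeRev [] intervals).reverse
  let starts := merged.map (fun p => p.1)
  ticket.foldl (fun result value =>
    if pvValid starts merged value then result else result ++ [value]) []

-- ===== PRECONDITION & SPEC =====
-- Pre_ excludes rule ranges that are not pairs, on which A's tuple unpacking raises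
-- ValueError (except for degenerate inputs where the unpacking is never reached, e.g.
-- an empty ticket) and B's comprehension always raises ValueError.
def Pre_ticket_errors (ticket : List Int) (rules : List (String × List (List Int))) : Prop :=
  ∀ r ∈ rules, ∀ rg ∈ r.2, rg.length = 2

instance (ticket : List Int) (rules : List (String × List (List Int))) : Decidable (Pre_ticket_errors ticket rules) := by unfold Pre_ticket_errors; infer_instance

def pvWitness_ticket_errors : List Int × (List (String × List (List Int))) :=
  ([7, 3], [("a", [[1, 3], [5, 6]])])

def Spec_ticket_errors (ticket : List Int) (rules : List (String × List (List Int))) (out : List Int) : Prop := out = ticket_errors_alt ticket rules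
instance (ticket : List Int) (rules : List (String × List (List Int))) (out : List Int) : Decidable (Spec_ticket_errors ticket rules out) := by unfold Spec_ticket_errors; infer_instance

-- ===== CLAIM (what is proved, stated in full; the proofs are below) =====
def Claim_equal_ticket_errors : Prop := ∀ (ticket : List Int) (rules : List (String × List (List Int))), Dom_ticket_errors ticket rules → Pre_ticket_errors ticket rules → Spec_ticket_errors ticket rules (ticket_errors ticket rules)

-- ===== LEMMAS AND PROOFS =====

-- a value is covered by an interval
def pvCover (v : Int) (p : Int × Int) : Prop := p.1 ≤ v ∧ v ≤ p.2

-- A's inner scan = coverage by some well-formed range of the list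
theorem pvCheckRanges_iff (v : Int) (rs : List (List Int)) :
    pvCheckRanges v rs = true ↔
      ∃ p ∈ rs.filterMap (fun rg =>
        match rg with | [lo, hi] => some (lo, hi) | _ => none), pvCover v p := by
  induction rs with
  | nil => simp [pvCheckRanges]
  | cons r rest ih =>
    match r with
    | [] => simpa [pvCheckRanges] using ih
    | [a] => simpa [pvCheckRanges] using ih
    | a :: b :: c :: t => simpa [pvCheckRanges] using ih
    | [a, b] =>
      simp only [pvCheckRanges, List.filterMap_cons]
      by_cases h : a ≤ v ∧ v ≤ b
      · simp [h, pvCover]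
      · simp only [if_neg h, ih]
        constructor
        · intro ⟨p, hp, hc⟩; exact ⟨p, by simp [hp], hc⟩
        · rintro ⟨p, hp, hc⟩
          simp only [List.mem_cons] at hp
          rcases hp with rfl | hp
          · exact absurd hc h
          · exact ⟨p, hp, hc⟩

-- A's whole test = coverage by some interval of pvIntervals
theorem pvCheckRules_iff (v : Int) (rules : List (String × List (List Int))) :
    pvCheckRules v rules = true ↔ ∃ p ∈ pvIntervals rules, pvCover v p := by
  induction rules with
  | nil => simp [pvCheckRules, pvIntervals]
  | cons r rest ih =>
    obtain ⟨name, rs⟩ := r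
    simp only [pvCheckRules, pvIntervals, List.flatMap_cons, List.mem_append]
    by_cases h : pvCheckRanges v rs = true
    · simp only [if_pos h, true_iff]
      obtain ⟨p, hp, hc⟩ := (pvCheckRanges_iff v rs).mp h
      exact ⟨p, Or.inl hp, hc⟩
    · simp only [if_neg h]
      rw [ih]
      unfold pvIntervals
      constructor
      · intro ⟨p, hp, hc⟩; exact ⟨p, Or.inr hp, hc⟩
      · rintro ⟨p, hp, hc⟩
        rcases hp with hp | hp
        · exact absurd ((pvCheckRanges_iff v rs).mpr ⟨p, hp, hc⟩) h
        · exact ⟨p, hp, hc⟩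

-- the merged accumulator invariant: reverse-sorted, gap of at least 2 between intervals
def pvInv (acc : List (Int × Int)) : Prop :=
  acc.Pairwise (fun p q => q.1 ≤ p.1 ∧ q.2 + 1 < p.1)

-- merging preserves the invariant and the covered set
theorem pvMergeRev_spec (l acc : List (Int × Int))
    (hsort : l.Pairwise (fun p q => p.1 ≤ q.1))
    (hacc : ∀ p ∈ acc, ∀ q ∈ l, p.1 ≤ q.1)
    (hinv : pvInv acc) :
    pvInv (pvMergeRev acc l) ∧
      (∀ v, (∃ p ∈ pvMergeRev acc l, pvCover v p) ↔
        (∃ p ∈ acc, pvCover v p) ∨ (∃ p ∈ l, pvCover v p)) := by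
  induction l generalizing acc with
  | nil => simp [pvMergeRev, hinv]
  | cons q rest ih =>
    obtain ⟨lo, hi⟩ := q
    have hsort' : rest.Pairwise (fun p q => p.1 ≤ q.1) := hsort.tail
    have hlo : ∀ q ∈ rest, lo ≤ q.1 := by
      intro q hq; exact (List.pairwise_cons.mp hsort).1 q hq
    match acc with
    | [] =>
      have h := ih [(lo, hi)] hsort'
        (by rintro p hp q hq; simp only [List.mem_singleton] at hp; subst hp; exact hlo q hq)
        (by simp [pvInv])
      simp only [pvMergeRev]
      refine ⟨h.1, fun v => ?_⟩
      rw [(h.2 v)]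
      constructor
      · rintro (⟨p, hp, hc⟩ | ⟨p, hp, hc⟩)
        · rcases List.mem_singleton.mp hp with rfl
          exact Or.inr ⟨(lo, hi), by simp, hc⟩
        · exact Or.inr ⟨p, by simp [hp], hc⟩
      · rintro (⟨p, hp, hc⟩ | ⟨p, hp, hc⟩)
        · simp at hp
        · rcases List.mem_cons.mp hp with rfl | hp
          · exact Or.inl ⟨(lo, hi), by simp, hc⟩
          · exact Or.inr ⟨p, hp, hc⟩
    | (l1, h1) :: acc' =>
      have hl1lo : l1 ≤ lo := hacc (l1, h1) (by simp) (lo, hi) (by simp)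
      by_cases hm : lo ≤ h1 + 1
      · -- merge into the head
        have hacc2 : ∀ p ∈ (l1, if hi > h1 then hi else h1) :: acc', ∀ q ∈ rest, p.1 ≤ q.1 := by
          intro p hp q hq
          rcases List.mem_cons.mp hp with rfl | hp
          · exact hacc (l1, h1) (by simp) q (by simp [hq])
          · exact hacc p (by simp [hp]) q (by simp [hq])
        have hinv2 : pvInv ((l1, if hi > h1 then hi else h1) :: acc') := by
          unfold pvInv at hinv ⊢
          rw [List.pairwise_cons] at hinv ⊢
          exact ⟨fun q hq => hinv.1 q hq, hinv.2⟩
        have h := ih _ hsort' hacc2 hinv2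
        simp only [pvMergeRev, if_pos hm]
        refine ⟨h.1, fun v => ?_⟩
        rw [h.2 v]
        have key : pvCover v (l1, if hi > h1 then hi else h1) ↔
            pvCover v (l1, h1) ∨ pvCover v (lo, hi) := by
          unfold pvCover; dsimp only; split_ifs with hgt <;> omega
        constructor
        · rintro (⟨p, hp, hc⟩ | ⟨p, hp, hc⟩)
          · rcases List.mem_cons.mp hp with rfl | hp
            · rcases key.mp hc with h' | h'
              · exact Or.inl ⟨(l1, h1), by simp, h'⟩
              · exact Or.inr ⟨(lo, hi), by simp, h'⟩
            · exact Or.inl ⟨p, by simp [hp], hc⟩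
          · exact Or.inr ⟨p, by simp [hp], hc⟩
        · rintro (⟨p, hp, hc⟩ | ⟨p, hp, hc⟩)
          · rcases List.mem_cons.mp hp with rfl | hp
            · exact Or.inl ⟨(l1, if hi > h1 then hi else h1), by simp, key.mpr (Or.inl hc)⟩
            · exact Or.inl ⟨p, by simp [hp], hc⟩
          · rcases List.mem_cons.mp hp with rfl | hp
            · exact Or.inl ⟨(l1, if hi > h1 then hi else h1), by simp, key.mpr (Or.inr hc)⟩
            · exact Or.inr ⟨p, hp, hc⟩
      · -- start a new interval
        have hacc2 : ∀ p ∈ (lo, hi) :: (l1, h1) :: acc', ∀ q ∈ rest, p.1 ≤ q.1 := by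
          intro p hp q hq
          rcases List.mem_cons.mp hp with rfl | hp
          · exact hlo q hq
          · exact hacc p hp q (by simp [hq])
        have hinv2 : pvInv ((lo, hi) :: (l1, h1) :: acc') := by
          unfold pvInv at hinv ⊢
          rw [List.pairwise_cons]
          refine ⟨?_, hinv⟩
          intro p hp
          rcases List.mem_cons.mp hp with rfl | hp
          · constructor
            · exact hl1lo
            · omega
          · have h1p := (List.pairwise_cons.mp hinv).1 p hp
            have hple : p.1 ≤ l1 := h1p.1
            exact ⟨le_trans hple hl1lo, by omega⟩
        have h := ih _ hsort' hacc2 hinv2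
        simp only [pvMergeRev, if_neg hm]
        refine ⟨h.1, fun v => ?_⟩
        rw [h.2 v]
        constructor
        · rintro (⟨p, hp, hc⟩ | ⟨p, hp, hc⟩)
          · rcases List.mem_cons.mp hp with rfl | hp
            · exact Or.inr ⟨(lo, hi), by simp, hc⟩
            · exact Or.inl ⟨p, hp, hc⟩
          · exact Or.inr ⟨p, by simp [hp], hc⟩
        · rintro (⟨p, hp, hc⟩ | ⟨p, hp, hc⟩)
          · exact Or.inl ⟨p, by simp [hp], hc⟩
          · rcases List.mem_cons.mp hp with rfl | hp
            · exact Or.inl ⟨(lo, hi), by simp, hc⟩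
            · exact Or.inr ⟨p, hp, hc⟩

-- the binary-search test is exactly membership in the merged union
theorem pvValid_iff (merged : List (Int × Int))
    (hpw : merged.Pairwise (fun p q => p.1 ≤ q.1 ∧ p.2 + 1 < q.1)) (v : Int) :
    pvValid (merged.map (fun p => p.1)) merged v = true ↔ ∃ p ∈ merged, pvCover v p := by
  have hsorted : (merged.map (fun p => p.1)).Pairwise (fun a b => a ≤ b) := by
    rw [List.pairwise_map]
    exact hpw.imp (fun h => h.1)
  obtain ⟨hle, hbelow, habove⟩ := PySem.List.bisectRight_spec _ v hsorted
  simp only [List.length_map] at hle hbelow habove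
  simp only [pvValid]
  rcases hn : PySem.List.bisectRight (merged.map (fun p => p.1)) v with _ | m
  · rw [hn]
    norm_num
    intro a b hab hc
    obtain ⟨j, hj, hpj⟩ := List.mem_iff_getElem.mp hab
    have h1 : v < merged[j].1 := by
      have := habove j hj (by omega)
      simpa using this
    have h2 : merged[j].1 = a := by rw [hpj]
    unfold pvCover at hc
    simp only [] at hc
    omega
  · rw [hn]
    have hmlt : m < merged.length := by omega
    have hidx : ((m + 1 : Nat) : Int) - 1 = ((m : Nat) : Int) := by push_cast; ring
    rw [hidx, if_neg (by omega : ¬ (((m : Nat) : Int) < 0)), PySem.List.pyGet?_natCast,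
      List.getElem?_eq_getElem hmlt]
    have hb : merged[m].1 ≤ v := by
      have := hbelow m hmlt (by omega)
      simpa using this
    constructor
    · intro h
      have hv : v ≤ merged[m].2 := by
        rcases hme : merged[m] with ⟨a, b⟩
        rw [hme] at h
        simpa using h
      exact ⟨merged[m], List.getElem_mem hmlt, hb, hv⟩
    · rintro ⟨p, hp, hc⟩
      obtain ⟨j, hj, hpj⟩ := List.mem_iff_getElem.mp hp
      rw [← hpj] at hc
      rcases hme : merged[m] with ⟨a, b⟩
      simp only [decide_eq_true_eq]
      have hgoal : v ≤ b := by
        by_cases hjm : j ≤ m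
        · rcases Nat.lt_or_eq_of_le hjm with hjlt | rfl
          · have hrel := List.pairwise_iff_getElem.mp hpw j m hj hmlt hjlt
            unfold pvCover at hc
            rw [hme] at hrel hb
            exfalso
            omega
          · rw [hme] at hc
            exact hc.2
        · have h1 : v < merged[j].1 := by
            have := habove j hj (by omega)
            simpa using this
          unfold pvCover at hc
          exfalso
          omega
      exact hgoal

-- the two per-value tests agree
theorem pvTests_agree (rules : List (String × List (List Int))) (v : Int) :
    pvCheckRules v rules =
      pvValid (((pvMergeRev [] (PySem.List.sorted (pvIntervals rules) (fun p => p.1))).reverse).map (fun p => p.1))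
        ((pvMergeRev [] (PySem.List.sorted (pvIntervals rules) (fun p => p.1))).reverse) v := by
  set s := PySem.List.sorted (pvIntervals rules) (fun p => p.1) with hs
  have hsort : s.Pairwise (fun p q => p.1 ≤ q.1) := PySem.List.sorted_pairwise _ _
  have hmerge := pvMergeRev_spec s [] hsort (by simp) (by simp [pvInv])
  have hpw : (pvMergeRev [] s).reverse.Pairwise (fun p q => p.1 ≤ q.1 ∧ p.2 + 1 < q.1) := by
    rw [List.pairwise_reverse]; exact hmerge.1
  have hiff := pvValid_iff ((pvMergeRev [] s).reverse) hpw v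
  have hcov : (∃ p ∈ (pvMergeRev [] s).reverse, pvCover v p) ↔ ∃ p ∈ pvIntervals rules, pvCover v p := by
    simp only [List.mem_reverse]
    rw [hmerge.2 v]
    simp only [List.not_mem_nil, false_and, exists_false, false_or]
    constructor
    · rintro ⟨p, hp, hc⟩
      exact ⟨p, (PySem.List.mem_sorted _ _ _ _).mp hp, hc⟩
    · rintro ⟨p, hp, hc⟩
      exact ⟨p, (PySem.List.mem_sorted _ _ _ _).mpr hp, hc⟩
  rw [Bool.eq_iff_iff, pvCheckRules_iff, hiff, hcov]

-- ===== VERDICT (by name: the statement is the Claim_ definition above) =====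
theorem ticket_errors_spec : Claim_equal_ticket_errors := by
  intro ticket rules _ _
  unfold Spec_ticket_errors ticket_errors ticket_errors_alt
  apply List.foldl_ext
  intro acc v _
  rw [pvTests_agree rules v]
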